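-- pv_equiv track=rewrite | github.com/imjinshuo/RulER | scripts/RQ3/utils.py | check_continuous
-- ===== SOURCE A (Python) =====
-- def check_continuous(diff_line_ids):
--     if not diff_line_ids:
--         return False
--     else:
--         if_continuous = True
--         pre_id = diff_line_ids[0]
--         for id in diff_line_ids[1:]:
--             if id == pre_id + 1:
--                 pre_id = id
--             else:
--                 if_continuous = False
--                 break
--         return if_continuous
-- ===== SOURCE B (Python) =====
-- def check_continuous(diff_line_ids):
--     if not diff_line_ids:
--         return False
--     first = diff_line_ids[0]
--     expected = [first + i for i in range(len(diff_line_ids))]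
--     return diff_line_ids == expected
-- ===== Notes on version B (the rewrite author's own statement) =====
-- stated objective: idiomatic
-- what changed: Replaces the stateful pairwise scan with early break by materializing the expected arithmetic sequence [first, first+1, ...] and comparing it to the input list in one equality check.
import Mathlib
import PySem

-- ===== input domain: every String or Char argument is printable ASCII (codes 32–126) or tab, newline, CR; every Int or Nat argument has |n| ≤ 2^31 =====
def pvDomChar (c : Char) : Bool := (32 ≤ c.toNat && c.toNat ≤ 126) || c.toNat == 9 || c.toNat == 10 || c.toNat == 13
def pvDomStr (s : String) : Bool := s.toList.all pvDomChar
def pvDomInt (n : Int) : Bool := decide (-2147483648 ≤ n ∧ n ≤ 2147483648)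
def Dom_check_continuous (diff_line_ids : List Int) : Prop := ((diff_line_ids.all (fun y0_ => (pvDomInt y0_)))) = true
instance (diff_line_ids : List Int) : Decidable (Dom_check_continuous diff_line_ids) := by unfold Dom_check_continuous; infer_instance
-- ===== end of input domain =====

-- B builds the expected consecutive run and compares lists once, instead of A's stateful pairwise scan with early break.

-- ===== PORT A =====
-- A's for-loop over diff_line_ids[1:] with the early 'break': structural recursion carrying pre_id;
-- the break corresponds to returning false immediately.
def check_continuous_loop (pre_id : Int) : List Int → Bool
  | [] => true
  | id :: rest => if id == pre_id + 1 then check_continuous_loop id rest else false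

def check_continuous (diff_line_ids : List Int) : Bool :=
  match diff_line_ids with
  | [] => false
  | first :: rest => check_continuous_loop first rest

-- ===== PORT B =====
def check_continuous_alt (diff_line_ids : List Int) : Bool :=
  match diff_line_ids with
  | [] => false
  | first :: _ =>
    -- expected = [first + i for i in range(len(diff_line_ids))]
    let expected := (List.range diff_line_ids.length).map (fun i : Nat => first + (i : Int))
    decide (diff_line_ids = expected)

-- ===== PRECONDITION & SPEC =====
def Spec_check_continuous (diff_line_ids : List Int) (out : Bool) : Prop := out = check_continuous_alt diff_line_ids
instance (diff_line_ids : List Int) (out : Bool) : Decidable (Spec_check_continuous diff_line_ids out) := by unfold Spec_check_continuous; infer_instance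

-- ===== CLAIM (what is proved, stated in full; the proofs are below) =====
def Claim_equal_check_continuous : Prop := ∀ (diff_line_ids : List Int), Dom_check_continuous diff_line_ids → Spec_check_continuous diff_line_ids (check_continuous diff_line_ids)

-- ===== LEMMAS AND PROOFS =====

theorem range_map_shift (f : Int) (n : Nat) :
    (List.range (n + 1)).map (fun i : Nat => f + (i : Int))
      = f :: (List.range n).map (fun i : Nat => f + 1 + (i : Int)) := by
  rw [List.range_succ_eq_map, List.map_cons, List.map_map]
  refine congrArg₂ List.cons (by simp) ?_
  apply List.map_congr_left; intro i _
  simp only [Function.comp]; push_cast; ring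

theorem check_continuous_loop_eq (xs : List Int) : ∀ (pre : Int),
    check_continuous_loop pre xs
      = decide (xs = (List.range xs.length).map (fun i : Nat => pre + 1 + (i : Int))) := by
  induction xs with
  | nil => intro pre; simp [check_continuous_loop]
  | cons id rest ih =>
    intro pre
    rw [show (id :: rest).length = rest.length + 1 from rfl, range_map_shift]
    simp only [check_continuous_loop]
    by_cases h : id = pre + 1
    · subst h
      rw [ih]
      simp [List.cons.injEq]
    · simp [h, List.cons.injEq]

-- ===== VERDICT (by name: the statement is the Claim_ definition above) =====
theorem check_continuous_spec : Claim_equal_check_continuous := by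
  intro l _
  unfold Spec_check_continuous
  match l with
  | [] => rfl
  | first :: rest =>
    show check_continuous_loop first rest = _
    rw [check_continuous_loop_eq]
    simp only [check_continuous_alt, List.length_cons, range_map_shift]
    simp [List.cons.injEq]
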